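-- pv_equiv track=rewrite | github.com/naimazzouz/naimazzouz.github.io | scripts/add_missing_objectives.py | build_objectives_div
-- ===== SOURCE A (Python) =====
-- def html_escape(text: str) -> str:
--     return (
--         text.replace("&", "&amp;")
--         .replace("<", "&lt;")
--         .replace(">", "&gt;")
--         .replace('"', "&quot;")
--     )
--
-- def build_objectives_div(items: list[str]) -> str:
--     items_html = "\n".join(f"  <li>{html_escape(it)}</li>" for it in items)
--     return f"""
-- <div class="objectifs">
--   <strong>Objectifs du chapitre :</strong>
--   <ul>
-- {items_html}
--   </ul>
-- </div>
-- """
-- ===== SOURCE B (Python) =====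
-- def _esc(c: str) -> str:
--     if c == '&':
--         return '&amp;'
--     if c == '<':
--         return '&lt;'
--     if c == '>':
--         return '&gt;'
--     if c == '"':
--         return '&quot;'
--     return c
--
-- def build_objectives_div(items: list[str]) -> str:
--     lines = []
--     for it in items:
--         escaped = "".join(_esc(c) for c in it)
--         lines.append("  <li>" + escaped + "</li>")
--     return (
--         '\n<div class="objectifs">\n  <strong>Objectifs du chapitre :</strong>\n  <ul>\n'
--         + "\n".join(lines)
--         + "\n  </ul>\n</div>\n"
--     )
-- ===== Notes on version B (the rewrite author's own statement) =====
-- stated objective: alternative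
-- what changed: html_escape's four sequential full-string .replace passes are replaced by a single per-character pass mapping each character through an escape function, and the <li> lines are built by an explicit accumulator loop before joining.
import Mathlib
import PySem

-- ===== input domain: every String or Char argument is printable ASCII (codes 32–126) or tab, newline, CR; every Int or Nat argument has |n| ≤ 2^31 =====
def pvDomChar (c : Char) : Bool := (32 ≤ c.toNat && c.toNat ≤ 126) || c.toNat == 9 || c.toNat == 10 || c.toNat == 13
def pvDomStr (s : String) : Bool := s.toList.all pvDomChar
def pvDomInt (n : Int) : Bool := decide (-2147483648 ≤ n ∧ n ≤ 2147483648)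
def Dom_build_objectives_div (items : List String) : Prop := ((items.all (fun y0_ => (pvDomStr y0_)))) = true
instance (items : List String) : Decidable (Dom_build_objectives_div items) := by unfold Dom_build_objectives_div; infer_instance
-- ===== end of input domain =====

-- B replaces the four sequential .replace passes by one single-pass per-character escape and
-- builds the <li> lines with an explicit accumulator loop (objective: alternative, same cost class).

-- ===== PORT A =====
-- html_escape: four chained str.replace calls
def pvHtmlEscape (text : String) : String :=
  PySem.Str.replace
    (PySem.Str.replace
      (PySem.Str.replace
        (PySem.Str.replace text "&" "&amp;")
        "<" "&lt;")
      ">" "&gt;")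
    "\"" "&quot;"

def build_objectives_div (items : List String) : String :=
  let items_html := PySem.Str.join "\n"
    (items.map (fun it => "  <li>" ++ pvHtmlEscape it ++ "</li>"))
  "\n<div class=\"objectifs\">\n  <strong>Objectifs du chapitre :</strong>\n  <ul>\n"
    ++ items_html ++ "\n  </ul>\n</div>\n"

-- ===== PORT B =====
-- _esc: early-return chain on a single character
def pvEsc (c : Char) : String :=
  if c = '&' then "&amp;"
  else if c = '<' then "&lt;"
  else if c = '>' then "&gt;"
  else if c = '"' then "&quot;"
  else String.ofList [c]

def build_objectives_div_alt (items : List String) : String :=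
  let lines := items.foldl
    (fun acc it =>
      acc ++ ["  <li>" ++ PySem.Str.join "" (it.toList.map pvEsc) ++ "</li>"]) []
  "\n<div class=\"objectifs\">\n  <strong>Objectifs du chapitre :</strong>\n  <ul>\n"
    ++ PySem.Str.join "\n" lines ++ "\n  </ul>\n</div>\n"

-- ===== PRECONDITION & SPEC =====
def Spec_build_objectives_div (items : List String) (out : String) : Prop := out = build_objectives_div_alt items
instance (items : List String) (out : String) : Decidable (Spec_build_objectives_div items out) := by unfold Spec_build_objectives_div; infer_instance

-- ===== CLAIM (what is proved, stated in full; the proofs are below) =====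
def Claim_equal_build_objectives_div : Prop := ∀ (items : List String), Dom_build_objectives_div items → Spec_build_objectives_div items (build_objectives_div items)

-- ===== LEMMAS AND PROOFS =====

-- joining with the empty separator is flattening
theorem pv_join_nil (ls : List (List Char)) : PySem.Chars.join [] ls = ls.flatten := by
  induction ls with
  | nil => rfl
  | cons a rest ih =>
      cases rest with
      | nil => simp [PySem.Chars.join, List.intercalate]
      | cons b r =>
          rw [PySem.Chars.join_cons_cons] at *
          simp_all [PySem.Chars.join]

-- replace with a single-character pattern is a per-character flatMap
theorem pv_replace_go_single (a : Char) (r : List Char) :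
    ∀ (l : List Char) (fuel : Nat) (acc : List Char), l.length ≤ fuel →
      PySem.Chars.replace.go [a] r fuel l acc
        = acc.reverse ++ l.flatMap (fun c => if c = a then r else [c]) := by
  intro l
  induction l with
  | nil =>
      intro fuel acc _
      cases fuel <;> simp [PySem.Chars.replace.go]
  | cons c t ih =>
      intro fuel acc h
      cases fuel with
      | zero => simp at h
      | succ n =>
          by_cases hc : c = a
          · have hpre : [a].isPrefixOf (c :: t) = true := by
              simp [List.isPrefixOf, hc]
            simp only [PySem.Chars.replace.go, hpre, if_pos, List.length_cons,
              List.length_nil, List.drop_succ_cons, List.drop_zero]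
            rw [ih n (r.reverse ++ acc) (by simpa using h)]
            simp [hc]
          · have hpre : [a].isPrefixOf (c :: t) = false := by
              simp [List.isPrefixOf]
              exact fun h' => hc h'.symm
            simp only [PySem.Chars.replace.go, hpre]
            rw [if_neg (by simp)]
            rw [ih n (c :: acc) (by simpa using h)]
            simp [hc]

theorem pv_replace_single (a : Char) (r l : List Char) :
    PySem.Chars.replace l [a] r = l.flatMap (fun c => if c = a then r else [c]) := by
  simp [PySem.Chars.replace, pv_replace_go_single a r l l.length [] le_rfl]

-- the four sequential single-character replaces collapse to one pass of pvEsc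
theorem pv_escape_eq (l : List Char) :
    PySem.Chars.replace
      (PySem.Chars.replace
        (PySem.Chars.replace
          (PySem.Chars.replace l ['&'] "&amp;".toList)
          ['<'] "&lt;".toList)
        ['>'] "&gt;".toList)
      ['"'] "&quot;".toList
      = l.flatMap (fun c => (pvEsc c).toList) := by
  simp only [pv_replace_single, List.flatMap_assoc]
  induction l with
  | nil => simp
  | cons c t ih =>
      simp only [List.flatMap_cons, ih]
      congr 1
      by_cases h1 : c = '&'
      · subst h1; decide
      · by_cases h2 : c = '<'
        · subst h2; simp [h1]; decide
        · by_cases h3 : c = '>'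
          · subst h3; simp [h1, h2]; decide
          · by_cases h4 : c = '"'
            · subst h4; simp [h1, h2, h3]; decide
            · simp [pvEsc, h1, h2, h3, h4]

theorem pv_htmlEscape_eq (it : String) :
    pvHtmlEscape it = PySem.Str.join "" (it.toList.map pvEsc) := by
  simp only [pvHtmlEscape, PySem.Str.replace, PySem.Str.join, String.toList_ofList]
  congr 1
  rw [show ("&".toList) = ['&'] from rfl, show ("<".toList) = ['<'] from rfl,
      show (">".toList) = ['>'] from rfl, show ("\"".toList) = ['"'] from rfl]
  rw [pv_escape_eq]
  rw [show ("".toList) = ([] : List Char) from rfl, pv_join_nil]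
  simp only [List.flatMap, List.map_map]
  rfl

-- ===== VERDICT (by name: the statement is the Claim_ definition above) =====
theorem build_objectives_div_spec : Claim_equal_build_objectives_div := by
  intro items _
  unfold Spec_build_objectives_div build_objectives_div build_objectives_div_alt
  rw [PySem.List.foldl_append_singleton_eq_map]
  simp only [pv_htmlEscape_eq, List.nil_append]
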